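-- pv_equiv track=rewrite | github.com/rowanterra/terrahedral | src/terrahedral/parsers/cif_parser.py | _parse_symmetry_ops
-- ===== SOURCE A (Python) =====
-- def _parse_symmetry_ops(text: str) -> list[str]:
--     """Extract symmetry operations from CIF.
--
--     Handles both old-style _symmetry_equiv_pos_as_xyz and
--     new-style _space_group_symop_operation_xyz tags (used by AMCSD).
--     """
--     ops = []
--     lines = text.split("\n")
--     in_block = False
--     columns: list[str] = []
--
--     SYM_PREFIXES = ("_symmetry_equiv_pos", "_space_group_symop")
--
--     for line in lines:
--         stripped = line.strip()
--
--         if any(stripped.startswith(p) for p in SYM_PREFIXES):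
--             if not in_block:
--                 in_block = True
--                 columns = []
--             columns.append(stripped)
--             continue
--
--         if in_block:
--             if not stripped or stripped.startswith("loop_") or (
--                 stripped.startswith("_") and
--                 not any(stripped.startswith(p) for p in SYM_PREFIXES)
--             ):
--                 in_block = False
--                 continue
--
--             # The line should be either:
--             # 'x,y,z'               (single column: _symmetry_equiv_pos_as_xyz)
--             # '1  x,y,z'            (two columns: _id + _as_xyz)
--             # Strip quotes
--             s = stripped.strip("'\"")
--             # If it starts with a number, skip the index
--             parts = s.split()
--             if len(parts) >= 2 and parts[0].isdigit():
--                 s = " ".join(parts[1:]).strip("'\"")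
--             elif len(parts) == 1:
--                 s = parts[0].strip("'\"")
--             else:
--                 s = s.strip("'\"")
--
--             # Validate: should contain x, y, z and commas
--             if "x" in s.lower() and "y" in s.lower() and "z" in s.lower():
--                 ops.append(s)
--
--     # Always include identity if not present
--     if not ops:
--         ops = ["x,y,z"]
--     return ops
-- ===== SOURCE B (Python) =====
-- SYM_PREFIXES = ("_symmetry_equiv_pos", "_space_group_symop")
--
--
-- def _is_ctrl(s):
--     """A control line: a symmetry tag, or a block terminator (blank / loop_ / other tag)."""
--     return s.startswith(SYM_PREFIXES) or not s or s.startswith(("loop_", "_"))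
--
--
-- def _extract(s):
--     """The symmetry op carried by a data line, or None if it is not one."""
--     s = s.strip("'\"")
--     parts = s.split()
--     if len(parts) >= 2 and parts[0].isdigit():
--         s = " ".join(parts[1:]).strip("'\"")
--     elif len(parts) == 1:
--         s = parts[0].strip("'\"")
--     else:
--         s = s.strip("'\"")
--     t = s.lower()
--     return s if ("x" in t and "y" in t and "z" in t) else None
--
--
-- def _parse_symmetry_ops(text: str) -> list[str]:
--     lines = [ln.strip() for ln in text.split("\n")]
--     # Index every control line once; each block is the run of (necessarily data)
--     # lines strictly between one control line and the next (or end of file), and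
--     # contributes iff its opening control line is a symmetry tag.
--     ctrls = [(i, s.startswith(SYM_PREFIXES)) for i, s in enumerate(lines) if _is_ctrl(s)]
--     nexts = [i for i, _ in ctrls[1:]] + [len(lines)]
--     ops = []
--     for (i, is_tag), nxt in zip(ctrls, nexts):
--         if is_tag:
--             for s in lines[i + 1 : nxt]:
--                 op = _extract(s)
--                 if op is not None:
--                     ops.append(op)
--     return ops or ["x,y,z"]
-- ===== Notes on version B (the rewrite author's own statement) =====
-- stated objective: alternative
-- what changed: Replaces A's single sequential state machine (in_block flag updated line by line, dead columns list) by an index-based two-pass algorithm: first enumerate and index all control lines (symmetry tags and terminators), then slice each candidate block out of the line list between consecutive control positions and extract/validate the ops from those slices.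
import Mathlib
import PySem

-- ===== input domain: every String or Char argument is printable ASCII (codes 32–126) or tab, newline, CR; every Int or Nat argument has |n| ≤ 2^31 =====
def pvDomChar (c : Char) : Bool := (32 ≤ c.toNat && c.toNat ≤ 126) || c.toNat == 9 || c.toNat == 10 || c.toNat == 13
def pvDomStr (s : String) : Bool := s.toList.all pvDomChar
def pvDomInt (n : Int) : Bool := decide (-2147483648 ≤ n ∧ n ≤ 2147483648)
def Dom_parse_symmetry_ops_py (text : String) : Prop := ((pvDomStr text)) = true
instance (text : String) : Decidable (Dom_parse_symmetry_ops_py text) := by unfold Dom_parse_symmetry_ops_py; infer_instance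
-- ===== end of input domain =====

set_option maxHeartbeats 1000000

-- B replaces A's sequential in_block state machine by an index-based two-pass algorithm:
-- enumerate and index the control lines once, then slice each block out between
-- consecutive control positions (objective: alternative, same O(n) cost).

-- ===== PORT A =====
def aSymPrefixes : List String := ["_symmetry_equiv_pos", "_space_group_symop"]

def aStep (st : List String × Bool × List String) (line : String) :
    List String × Bool × List String :=
  let ops := st.1
  let in_block := st.2.1
  let columns := st.2.2
  let stripped := PySem.Str.strip line
  if aSymPrefixes.any (fun p => PySem.Str.startswith stripped p) then
    let columns := if !in_block then ([] : List String) else columns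
    (ops, true, columns ++ [stripped])
  else if in_block then
    if stripped == "" || PySem.Str.startswith stripped "loop_" ||
       (PySem.Str.startswith stripped "_" &&
        !(aSymPrefixes.any (fun p => PySem.Str.startswith stripped p))) then
      (ops, false, columns)
    else
      let s := PySem.Str.stripChars stripped "'\""
      let parts := PySem.Str.split₀ s
      let s := if 2 ≤ parts.length && PySem.Str.strIsdigit (parts.headD "") then
                 PySem.Str.stripChars (PySem.Str.join " " (parts.drop 1)) "'\""
               else if parts.length == 1 then
                 PySem.Str.stripChars (parts.headD "") "'\""
               else
                 PySem.Str.stripChars s "'\""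
      if PySem.Str.isIn "x" (PySem.Str.lower s) && PySem.Str.isIn "y" (PySem.Str.lower s) &&
         PySem.Str.isIn "z" (PySem.Str.lower s) then
        (ops ++ [s], true, columns)
      else
        (ops, true, columns)
  else
    (ops, false, columns)


def parse_symmetry_ops_py (text : String) : List String :=
  let lines := (PySem.Str.split? text "\n").getD []
  let st := lines.foldl aStep ([], false, [])
  let ops := st.1
  if ops.isEmpty then ["x,y,z"] else ops

-- ===== PORT B =====
def bTag (s : String) : Bool :=
  PySem.Str.startswith s "_symmetry_equiv_pos" || PySem.Str.startswith s "_space_group_symop"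

def bCtrl (s : String) : Bool :=
  bTag s || s == "" || PySem.Str.startswith s "loop_" || PySem.Str.startswith s "_"

def bExtract (s0 : String) : Option String :=
  let s := PySem.Str.stripChars s0 "'\""
  let parts := PySem.Str.split₀ s
  let s := if 2 ≤ parts.length && PySem.Str.strIsdigit (parts.headD "") then
             PySem.Str.stripChars (PySem.Str.join " " (parts.drop 1)) "'\""
           else if parts.length == 1 then
             PySem.Str.stripChars (parts.headD "") "'\""
           else
             PySem.Str.stripChars s "'\""
  let t := PySem.Str.lower s
  if PySem.Str.isIn "x" t && PySem.Str.isIn "y" t && PySem.Str.isIn "z" t then some s else none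


def bStepOp (ops : List String) (s : String) : List String :=
  match bExtract s with
  | some op => ops ++ [op]
  | none => ops

def parse_symmetry_ops_py_alt (text : String) : List String :=
  let lines := ((PySem.Str.split? text "\n").getD []).map PySem.Str.strip
  let ctrls := (PySem.List.enumerate lines).filterMap
      (fun p => if bCtrl p.2 then some (p.1, bTag p.2) else none)
  let nexts := (ctrls.drop 1).map (fun p => p.1) ++ [PySem.List.len lines]
  let ops := (ctrls.zip nexts).foldl
      (fun ops q =>
        if q.1.2 then
          (PySem.List.slice lines (some (q.1.1 + 1)) (some q.2)).foldl bStepOp ops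
        else ops) []
  if ops.isEmpty then ["x,y,z"] else ops


-- ===== PRECONDITION & SPEC =====
def Spec_parse_symmetry_ops_py (text : String) (out : List String) : Prop := out = parse_symmetry_ops_py_alt text
instance (text : String) (out : List String) : Decidable (Spec_parse_symmetry_ops_py text out) := by unfold Spec_parse_symmetry_ops_py; infer_instance

-- ===== CLAIM (what is proved, stated in full; the proofs are below) =====
def Claim_equal_parse_symmetry_ops_py : Prop := ∀ (text : String), Dom_parse_symmetry_ops_py text → Spec_parse_symmetry_ops_py text (parse_symmetry_ops_py text)

-- ===== LEMMAS AND PROOFS =====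

def pvExt : List String → List String
  | [] => []
  | x :: l => (bExtract x).toList ++ pvExt l

def pvF : List String → Bool → List String
  | [], _ => []
  | s :: t, b =>
    if bCtrl s then pvF t (bTag s)
    else (if b then (bExtract s).toList else []) ++ pvF t b

def pvChunks : List String → List (String × List String) × List String
  | [] => ([], [])
  | x :: t =>
    let p := pvChunks t
    if bCtrl x then ((x, p.2) :: p.1, []) else (p.1, x :: p.2)

def pvFl : List (String × List String) → List String
  | [] => []
  | c :: cs => (if bTag c.1 then pvExt c.2 else []) ++ pvFl cs

def pvCtrlsN : List String → List (Nat × Bool)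
  | [] => []
  | x :: t => (if bCtrl x then [(0, bTag x)] else []) ++ (pvCtrlsN t).map (fun p => (p.1 + 1, p.2))

def pvHeadPos (t : List String) : Nat :=
  match pvCtrlsN t with
  | [] => t.length
  | (i, _) :: _ => i

def pvNextsN (t : List String) : List Nat :=
  ((pvCtrlsN t).drop 1).map (fun p => p.1) ++ [t.length]

def pvBlockN (lines : List String) (i n : Nat) : List String :=
  pvExt ((lines.drop (i + 1)).take (n - (i + 1)))

def pvBfoldN (lines : List String) (z : List ((Nat × Bool) × Nat)) (acc : List String) : List String :=
  z.foldl (fun acc q => if q.1.2 then acc ++ pvBlockN lines q.1.1 q.2 else acc) acc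

lemma pvExt_cons (x : String) (l : List String) :
    pvExt (x :: l) = (bExtract x).toList ++ pvExt l := rfl

lemma pvBfoldN_acc (lines : List String) (z : List ((Nat × Bool) × Nat)) (acc : List String) :
    pvBfoldN lines z acc = acc ++ pvBfoldN lines z [] := by
  induction z generalizing acc with
  | nil => simp [pvBfoldN]
  | cons q t ih =>
    have hstep : ∀ a, pvBfoldN lines (q :: t) a
        = pvBfoldN lines t (if q.1.2 then a ++ pvBlockN lines q.1.1 q.2 else a) := fun a => rfl
    rw [hstep, hstep, ih, ih (if q.1.2 then [] ++ pvBlockN lines q.1.1 q.2 else [])]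
    by_cases h : q.1.2 = true <;> simp [h]

lemma pvMapShiftInt (l : List (Nat × Bool)) (s : Int) :
    ((l.map (fun p => (p.1 + 1, p.2))).map (fun (p : Nat × Bool) => (s + (p.1 : Int), p.2)))
      = l.map (fun (p : Nat × Bool) => (s + 1 + (p.1 : Int), p.2)) := by
  induction l with
  | nil => simp
  | cons p t ih =>
    simp only [List.map_cons, ih, List.cons.injEq]
    refine ⟨?_, trivial⟩
    congr 1
    push_cast
    ring

lemma pvCtrls_enum (l : List String) (s : Int) :
    (PySem.List.enumerate l s).filterMap
        (fun p => if bCtrl p.2 = true then some (p.1, bTag p.2) else none)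
      = (pvCtrlsN l).map (fun (p : Nat × Bool) => (s + (p.1 : Int), p.2)) := by
  induction l generalizing s with
  | nil => simp [PySem.List.enumerate_nil, pvCtrlsN]
  | cons x t ih =>
    rw [PySem.List.enumerate_cons, List.filterMap_cons, ih (s + 1)]
    by_cases h : bCtrl x = true
    · simp only [h, if_true, pvCtrlsN, List.map_append, List.map_cons, List.map_nil,
        List.singleton_append, pvMapShiftInt]
      norm_num
    · simp only [h, Bool.false_eq_true, if_false, pvCtrlsN, List.nil_append, pvMapShiftInt]

lemma pvShift (x : String) (t : List String) (z : List ((Nat × Bool) × Nat)) (acc : List String) :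
    pvBfoldN (x :: t) (z.map (fun q => ((q.1.1 + 1, q.1.2), q.2 + 1))) acc
      = pvBfoldN t z acc := by
  induction z generalizing acc with
  | nil => simp [pvBfoldN]
  | cons q r ih =>
    have h1 : ∀ L (q' : (Nat × Bool) × Nat) zz a, pvBfoldN L (q' :: zz) a
        = pvBfoldN L zz (if q'.1.2 then a ++ pvBlockN L q'.1.1 q'.2 else a) := fun _ _ _ _ => rfl
    simp only [List.map_cons]
    rw [h1, h1]
    have hb : pvBlockN (x :: t) (q.1.1 + 1) (q.2 + 1) = pvBlockN t q.1.1 q.2 := by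
      simp only [pvBlockN, List.drop_succ_cons]
      congr 2
      omega
    rw [hb]
    exact ih _

lemma pvChunks_fst_nil (t : List String) (h : pvCtrlsN t = []) : (pvChunks t).1 = [] := by
  induction t with
  | nil => simp [pvChunks]
  | cons x r ih =>
    by_cases hc : bCtrl x = true
    · exfalso; simp [pvCtrlsN, hc] at h
    · simp only [pvCtrlsN, hc, Bool.false_eq_true, if_false, List.nil_append] at h
      have hnil : pvCtrlsN r = [] := by
        cases hr : pvCtrlsN r
        · rfl
        · rw [hr] at h; simp at h
      simp [pvChunks, hc, ih hnil]

lemma pvTakeHead (t : List String) : t.take (pvHeadPos t) = (pvChunks t).2 := by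
  induction t with
  | nil => simp [pvChunks]
  | cons x r ih =>
    by_cases hc : bCtrl x = true
    · simp [pvHeadPos, pvCtrlsN, hc, pvChunks]
    · simp only [pvChunks, hc, Bool.false_eq_true, if_false]
      cases hr : pvCtrlsN r with
      | nil =>
        have h1 : pvHeadPos (x :: r) = r.length + 1 := by
          simp [pvHeadPos, pvCtrlsN, hc, hr]
        have h2 : pvHeadPos r = r.length := by simp [pvHeadPos, hr]
        rw [h1]
        rw [h2] at ih
        simp at ih ⊢
        exact ih
      | cons p cr =>
        have h1 : pvHeadPos (x :: r) = p.1 + 1 := by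
          simp [pvHeadPos, pvCtrlsN, hc, hr]
        have h2 : pvHeadPos r = p.1 := by simp [pvHeadPos, hr]
        rw [h1, List.take_succ_cons]
        rw [h2] at ih
        rw [ih]

lemma pvF_chunks (l : List String) (b : Bool) :
    pvF l b = (if b then pvExt (pvChunks l).2 else []) ++ pvFl (pvChunks l).1 := by
  induction l generalizing b with
  | nil => cases b <;> simp [pvF, pvChunks, pvFl, pvExt]
  | cons x t ih =>
    by_cases hc : bCtrl x = true
    · simp only [pvF, hc, if_true, pvChunks]
      rw [ih]
      cases b <;> simp [pvFl, pvExt]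
    · simp only [pvF, hc, Bool.false_eq_true, if_false, pvChunks]
      rw [ih]
      cases b with
      | false => simp
      | true => simp [pvExt]


lemma pvZipShift (cs : List (Nat × Bool)) (ns : List Nat) :
    (cs.map (fun p => (p.1 + 1, p.2))).zip (ns.map (fun n => n + 1))
      = (cs.zip ns).map (fun q => ((q.1.1 + 1, q.1.2), q.2 + 1)) := by
  rw [List.zip_map]
  apply List.map_congr_left
  intro q _
  rfl

lemma pvMain (t : List String) :
    pvBfoldN t ((pvCtrlsN t).zip (pvNextsN t)) [] = pvFl (pvChunks t).1 := by
  have hcons : ∀ L (q' : (Nat × Bool) × Nat) zz a, pvBfoldN L (q' :: zz) a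
      = pvBfoldN L zz (if q'.1.2 then a ++ pvBlockN L q'.1.1 q'.2 else a) := fun _ _ _ _ => rfl
  induction t with
  | nil => simp [pvCtrlsN, pvBfoldN, pvChunks, pvFl]
  | cons x t ih =>
    by_cases hc : bCtrl x = true
    · cases hcn : pvCtrlsN t with
      | nil =>
        have hcs : pvCtrlsN (x :: t) = [(0, bTag x)] := by
          simp [pvCtrlsN, hc, hcn]
        have hnx : pvNextsN (x :: t) = [t.length + 1] := by
          simp [pvNextsN, pvCtrlsN, hc, hcn]
        have hblock : pvBlockN (x :: t) 0 (t.length + 1) = pvExt (pvChunks t).2 := by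
          have hth := pvTakeHead t
          rw [pvHeadPos, hcn] at hth
          simp [pvBlockN, ← hth]
        have hfl : pvFl (pvChunks t).1 = [] := by
          rw [pvChunks_fst_nil t hcn]; rfl
        rw [hcs, hnx]
        simp only [List.zip_cons_cons, List.zip_nil_left]
        rw [hcons]
        simp only [pvChunks, hc, if_true, pvFl]
        rw [hfl, hblock]
        by_cases ht : bTag x = true <;> simp [ht, pvBfoldN]
      | cons p cr =>
        have hcs : pvCtrlsN (x :: t) = (0, bTag x) :: (pvCtrlsN t).map (fun p => (p.1 + 1, p.2)) := by
          simp [pvCtrlsN, hc]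
        have hnx : pvNextsN (x :: t) = (p.1 + 1) :: ((pvNextsN t).map (fun n => n + 1)) := by
          simp only [pvNextsN, hcs, List.drop_succ_cons, List.drop_zero, hcn, List.map_cons,
            List.map_append, List.map_map]
          simp [Function.comp]
        have hblock : pvBlockN (x :: t) 0 (p.1 + 1) = pvExt (pvChunks t).2 := by
          have hth := pvTakeHead t
          rw [pvHeadPos, hcn] at hth
          simp [pvBlockN, ← hth]
        rw [hcs, hnx]
        simp only [List.zip_cons_cons]
        rw [hcons, pvZipShift, pvShift, pvBfoldN_acc, ih]
        simp only [pvChunks, hc, if_true, pvFl]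
        rw [hblock]
        by_cases ht : bTag x = true <;> simp [ht]
    · have hcs : pvCtrlsN (x :: t) = (pvCtrlsN t).map (fun p => (p.1 + 1, p.2)) := by
        simp [pvCtrlsN, hc]
      have hnx : pvNextsN (x :: t) = (pvNextsN t).map (fun n => n + 1) := by
        rw [pvNextsN, hcs, pvNextsN, List.map_append, List.map_map, ← List.map_drop, List.map_map]
        congr 1
      rw [hcs, hnx, pvZipShift, pvShift, ih]
      simp [pvChunks, hc]

lemma bStepOp_eq (ops : List String) (s : String) :
    bStepOp ops s = ops ++ (bExtract s).toList := by
  unfold bStepOp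
  cases bExtract s
  · simp
  · simp

lemma pvInnerFold (l : List String) (acc : List String) :
    l.foldl bStepOp acc = acc ++ pvExt l := by
  induction l generalizing acc with
  | nil => simp [pvExt]
  | cons x t ih =>
    rw [List.foldl_cons, ih, bStepOp_eq, pvExt_cons, List.append_assoc]

lemma pvSliceBlock (L : List String) (i n : Nat) (acc : List String) :
    (PySem.List.slice L (some ((i : Int) + 1)) (some (n : Int))).foldl bStepOp acc
      = acc ++ pvBlockN L i n := by
  have h1 : ((i : Int) + 1) = ((i + 1 : Nat) : Int) := by push_cast; ring
  rw [h1, PySem.List.slice_natCast]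
  exact pvInnerFold _ acc

lemma pvIntFold (L : List String) (z : List ((Nat × Bool) × Nat)) (acc : List String) :
    (z.map (fun q => (((q.1.1 : Int), q.1.2), (q.2 : Int)))).foldl
      (fun ops q =>
        if q.1.2 then
          (PySem.List.slice L (some (q.1.1 + 1)) (some q.2)).foldl bStepOp ops
        else ops) acc
      = pvBfoldN L z acc := by
  induction z generalizing acc with
  | nil => rfl
  | cons q r ih =>
    simp only [List.map_cons, List.foldl_cons]
    rw [show pvBfoldN L (q :: r) acc
        = pvBfoldN L r (if q.1.2 then acc ++ pvBlockN L q.1.1 q.2 else acc) from rfl]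
    rw [ih]
    congr 1
    by_cases h : q.1.2 = true
    · simp only [h, if_true]
      exact pvSliceBlock L q.1.1 q.2 acc
    · simp only [h, Bool.false_eq_true, if_false]

lemma pvB_eq (text : String) :
    parse_symmetry_ops_py_alt text
      = (let L := ((PySem.Str.split? text "\n").getD []).map PySem.Str.strip
         let ops := pvBfoldN L ((pvCtrlsN L).zip (pvNextsN L)) []
         if ops.isEmpty then ["x,y,z"] else ops) := by
  unfold parse_symmetry_ops_py_alt
  simp only []
  rw [pvCtrls_enum]
  simp only [zero_add]
  generalize ((PySem.Str.split? text "\n").getD []).map PySem.Str.strip = L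
  have hne : List.map (fun (p : Int × Bool) => p.1)
        (List.drop 1 (List.map (fun (p : Nat × Bool) => ((p.1 : Int), p.2)) (pvCtrlsN L)))
        ++ [PySem.List.len L]
      = List.map (fun (n : Nat) => (n : Int)) (pvNextsN L) := by
    rw [← List.map_drop, List.map_map, pvNextsN, List.map_append, List.map_map]
    congr 1
  rw [hne, List.zip_map]
  rw [show Prod.map (fun (p : Nat × Bool) => ((p.1 : Int), p.2)) (fun (n : Nat) => (n : Int))
      = (fun (q : (Nat × Bool) × Nat) => (((q.1.1 : Int), q.1.2), (q.2 : Int)))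
      from funext (fun q => rfl)]
  rw [pvIntFold]

lemma pvA_inv (ls : List String) (ops : List String) (b : Bool) (cols : List String) :
    (ls.foldl aStep (ops, b, cols)).1 = ops ++ pvF (ls.map PySem.Str.strip) b := by
  induction ls generalizing ops b cols with
  | nil => simp [pvF]
  | cons l t ih =>
    simp only [List.foldl_cons, List.map_cons]
    by_cases h1 : PySem.Chars.startswith (PySem.Chars.strip l.toList)
        ['_','s','y','m','m','e','t','r','y','_','e','q','u','i','v','_','p','o','s'] = true
    · have ea : aStep (ops, b, cols) l
          = (ops, true, (if !b then [] else cols) ++ [PySem.Str.strip l]) := by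
        simp [aStep, aSymPrefixes, h1]
      have hct : bCtrl (PySem.Str.strip l) = true := by simp [bCtrl, bTag, h1]
      have htg : bTag (PySem.Str.strip l) = true := by simp [bTag, h1]
      rw [ea, show pvF (PySem.Str.strip l :: t.map PySem.Str.strip) b
          = pvF (t.map PySem.Str.strip) (bTag (PySem.Str.strip l)) from by rw [pvF, hct]; simp, htg]
      exact ih ops true _
    · by_cases h2 : PySem.Chars.startswith (PySem.Chars.strip l.toList)
          ['_','s','p','a','c','e','_','g','r','o','u','p','_','s','y','m','o','p'] = true
      · have ea : aStep (ops, b, cols) l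
            = (ops, true, (if !b then [] else cols) ++ [PySem.Str.strip l]) := by
          simp [aStep, aSymPrefixes, h2]
        have hct : bCtrl (PySem.Str.strip l) = true := by simp [bCtrl, bTag, h1, h2]
        have htg : bTag (PySem.Str.strip l) = true := by simp [bTag, h1, h2]
        rw [ea, show pvF (PySem.Str.strip l :: t.map PySem.Str.strip) b
            = pvF (t.map PySem.Str.strip) (bTag (PySem.Str.strip l)) from by rw [pvF, hct]; simp, htg]
        exact ih ops true _
      · replace h1 : PySem.Chars.startswith (PySem.Chars.strip l.toList)
            ['_','s','y','m','m','e','t','r','y','_','e','q','u','i','v','_','p','o','s'] = false := by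
          simpa using h1
        replace h2 : PySem.Chars.startswith (PySem.Chars.strip l.toList)
            ['_','s','p','a','c','e','_','g','r','o','u','p','_','s','y','m','o','p'] = false := by
          simpa using h2
        have htg : bTag (PySem.Str.strip l) = false := by simp [bTag, h1, h2]
        cases b with
        | false =>
          have ea : aStep (ops, false, cols) l = (ops, false, cols) := by
            simp [aStep, aSymPrefixes, h1, h2]
          have eF : pvF (PySem.Str.strip l :: t.map PySem.Str.strip) false
              = pvF (t.map PySem.Str.strip) false := by
            by_cases hcf : bCtrl (PySem.Str.strip l) = true
            · rw [pvF, if_pos hcf, htg]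
            · rw [pvF, if_neg hcf]; simp
          rw [ea, eF]
          exact ih ops false cols
        | true =>
          by_cases hstop : (PySem.Str.strip l = "" ∨
              PySem.Chars.startswith (PySem.Chars.strip l.toList) ['l','o','o','p','_'] = true) ∨
              PySem.Chars.startswith (PySem.Chars.strip l.toList) ['_'] = true
          · have ea : aStep (ops, true, cols) l = (ops, false, cols) := by
              simp [aStep, aSymPrefixes, h1, h2, hstop]
            have hct : bCtrl (PySem.Str.strip l) = true := by
              rcases hstop with (he | hl) | hu
              · simp [bCtrl, he]
              · simp [bCtrl, hl]
              · simp [bCtrl, hu]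
            have eF : pvF (PySem.Str.strip l :: t.map PySem.Str.strip) true
                = pvF (t.map PySem.Str.strip) false := by
              rw [pvF, if_pos hct, htg]
            rw [ea, eF]
            exact ih ops false cols
          · have hcf : bCtrl (PySem.Str.strip l) = false := by
              push_neg at hstop
              simp [bCtrl, bTag, h1, h2, hstop.1.1, hstop.1.2, hstop.2]
            have ea : aStep (ops, true, cols) l
                = (ops ++ (bExtract (PySem.Str.strip l)).toList, true, cols) := by
              simp only [aStep, bExtract]
              split_ifs <;> simp_all [aSymPrefixes]
            have eF : pvF (PySem.Str.strip l :: t.map PySem.Str.strip) true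
                = (bExtract (PySem.Str.strip l)).toList ++ pvF (t.map PySem.Str.strip) true := by
              rw [pvF, if_neg (by simp [hcf]), if_pos rfl]
            rw [ea, eF, ih (ops ++ (bExtract (PySem.Str.strip l)).toList) true cols,
              List.append_assoc]

-- ===== VERDICT (by name: the statement is the Claim_ definition above) =====
theorem parse_symmetry_ops_py_spec : Claim_equal_parse_symmetry_ops_py := by
  intro text _
  show parse_symmetry_ops_py text = parse_symmetry_ops_py_alt text
  rw [pvB_eq]
  simp only [parse_symmetry_ops_py]
  rw [pvA_inv, List.nil_append, pvMain, pvF_chunks]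
  simp
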